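-- pv_equiv track=rewrite | github.com/cyhhao/vibe-remote | vibe/opencode_config.py | _consume_json_string
-- ===== SOURCE A (Python) =====
-- def _consume_json_string(source: str, start: int) -> int:
--     i = start + 1
--     escaped = False
--     while i < len(source):
--         char = source[i]
--         if escaped:
--             escaped = False
--         elif char == "\\":
--             escaped = True
--         elif char == '"':
--             return i + 1
--         i += 1
--     raise ValueError("unterminated string")
-- ===== SOURCE B (Python) =====
-- def _consume_json_string(source: str, start: int) -> int:
--     pos = start + 1
--     while True:
--         idx = source.find('"', pos)
--         if idx == -1:
--             raise ValueError("unterminated string")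
--         bs = 0
--         while idx - bs - 1 >= pos and source[idx - bs - 1] == "\\":
--             bs += 1
--         if bs % 2 == 0:
--             return idx + 1
--         pos = idx + 1
-- ===== Notes on version B (the rewrite author's own statement) =====
-- stated objective: idiomatic
-- what changed: Replaces the per-character escaped-flag state machine by a str.find jump to each candidate closing quote plus a parity check on the run of backslashes immediately before it.
-- outside the precondition, e.g. on _consume_json_string('x"', -2): A returns 0, B returns 2; on _consume_json_string('"a', -2): A returns 1, B raises ValueError
import Mathlib
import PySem

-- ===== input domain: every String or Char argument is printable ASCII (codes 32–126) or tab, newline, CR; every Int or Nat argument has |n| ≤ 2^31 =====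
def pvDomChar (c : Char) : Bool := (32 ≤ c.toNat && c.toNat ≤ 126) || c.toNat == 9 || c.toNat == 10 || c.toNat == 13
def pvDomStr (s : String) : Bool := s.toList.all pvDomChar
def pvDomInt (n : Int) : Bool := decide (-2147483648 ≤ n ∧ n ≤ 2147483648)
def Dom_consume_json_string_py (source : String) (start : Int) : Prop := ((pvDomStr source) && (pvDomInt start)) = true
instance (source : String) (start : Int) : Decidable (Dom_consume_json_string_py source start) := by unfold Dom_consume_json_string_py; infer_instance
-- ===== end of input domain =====

-- B replaces A's per-character escaped-flag state machine by str.find jumps between candidate closing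
-- quotes with a parity check on the backslash run before each candidate (idiomatic; same O(n) cost).
-- Loops are ported with an explicit fuel that equals each loop's exact iteration bound; where the
-- Pythons raise ValueError/IndexError both ports return 0, and Pre_ excludes those inputs.

-- ===== PORT A =====
-- literal port of A's while loop: index i, escaped flag; fuel = remaining loop iterations
def consumeA (cs : List Char) (fuel : Nat) (i : Int) (escaped : Bool) : Int :=
  match fuel with
  | 0 => 0
  | f + 1 =>
    if i < (cs.length : Int) then
      match PySem.List.pyGet? cs i with
      | none => 0
      | some c =>
        if escaped then consumeA cs f (i + 1) false
        else if c = '\\' then consumeA cs f (i + 1) true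
        else if c = '"' then i + 1
        else consumeA cs f (i + 1) escaped
    else 0

-- ===== PORT B =====
-- inner while loop of Source B: count the backslashes immediately before idx, not below lo
def bsCount (cs : List Char) (fuel : Nat) (idx lo bs : Int) : Int :=
  match fuel with
  | 0 => bs
  | f + 1 =>
    if lo ≤ idx - bs - 1 then
      match PySem.List.pyGet? cs (idx - bs - 1) with
      | some c => if c = '\\' then bsCount cs f idx lo (bs + 1) else bs
      | none => bs
    else bs

-- outer while-True loop of Source B (at most len+1 iterations: pos strictly increases)
def consumeB (cs : List Char) (fuel : Nat) (pos : Int) : Int :=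
  match fuel with
  | 0 => 0
  | f + 1 =>
    let idx := PySem.Chars.findFrom cs ['"'] pos none
    if idx = -1 then 0
    else if PySem.Int.mod (bsCount cs (idx - pos).toNat idx pos 0) 2 = 0 then idx + 1
    else consumeB cs f (idx + 1)

def consume_json_string_py (source : String) (start : Int) : Int :=
  consumeA source.toList ((source.toList.length : Int) - (start + 1)).toNat (start + 1) false

def consume_json_string_py_alt (source : String) (start : Int) : Int :=
  consumeB source.toList (source.toList.length + 1) (start + 1)


-- ===== PRECONDITION & SPEC =====
-- Pre_ excludes (a) inputs where A raises (no unescaped closing quote at or after start+1 raises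
-- ValueError; start+1 < -len(source) raises IndexError), and (b) the remaining start+1 < 0 inputs,
-- where A returns via Python's accidental negative-index wraparound (it can even return 0 or a
-- negative "index") while B's str.find clamps the start bound or raises instead.
def Pre_consume_json_string_py (source : String) (start : Int) : Prop :=
  0 ≤ start + 1 ∧
  ∃ j : Nat, j < source.toList.length ∧ start + 1 ≤ (j : Int) ∧ source.toList[j]! = '"' ∧
    2 ∣ (((source.toList.take j).drop (start + 1).toNat).reverse.takeWhile (fun c => c = '\\')).length
instance (source : String) (start : Int) : Decidable (Pre_consume_json_string_py source start) := by
  unfold Pre_consume_json_string_py; infer_instance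

def pvWitness_consume_json_string_py : String × Int := ("\"hi\"", 0)

def Spec_consume_json_string_py (source : String) (start : Int) (out : Int) : Prop := out = consume_json_string_py_alt source start
instance (source : String) (start : Int) (out : Int) : Decidable (Spec_consume_json_string_py source start out) := by unfold Spec_consume_json_string_py; infer_instance

-- ===== CLAIM (what is proved, stated in full; the proofs are below) =====
def Claim_equal_consume_json_string_py : Prop := ∀ (source : String) (start : Int), Dom_consume_json_string_py source start → Pre_consume_json_string_py source start → Spec_consume_json_string_py source start (consume_json_string_py source start)

-- ===== LEMMAS AND PROOFS =====

theorem findFrom_quote_bounds (cs : List Char) (pos : Int)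
    (h : PySem.Chars.findFrom cs ['"'] pos none ≠ -1) :
    pos ≤ PySem.Chars.findFrom cs ['"'] pos none ∧
    0 ≤ PySem.Chars.findFrom cs ['"'] pos none ∧
    PySem.Chars.findFrom cs ['"'] pos none < (cs.length : Int) := by
  unfold PySem.Chars.findFrom at *
  simp only [Int.toNat_natCast, List.take_length] at h ⊢
  set st : Int := if pos < 0 then (if pos + (cs.length : Int) < 0 then 0 else pos + (cs.length : Int)) else pos with hst
  have hstb : 0 ≤ st ∧ pos ≤ st := by
    constructor <;> (rw [hst]; split_ifs <;> omega)
  split_ifs at h ⊢ with h1 h2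
  · exact absurd rfl h
  · exact absurd rfl h
  · have hr0 : 0 ≤ PySem.Chars.find (List.drop st.toNat cs) ['"'] := by
      have := PySem.Chars.neg_one_le_find (List.drop st.toNat cs) ['"']; omega
    have hpre := (PySem.Chars.find_spec (s := List.drop st.toNat cs) (sub := ['"']) hr0).1
    have hlt : (PySem.Chars.find (List.drop st.toNat cs) ['"']).toNat < (List.drop st.toNat cs).length := by
      by_contra hge
      rw [List.drop_eq_nil_of_le (by omega)] at hpre
      exact (List.cons_ne_nil _ _) (List.prefix_nil.mp hpre)
    rw [List.length_drop] at hlt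
    refine ⟨by omega, by omega, by omega⟩

theorem find_of_prefix (s : List Char) (h : ['"'] <+: s) : PySem.Chars.find s ['"'] = 0 := by
  have h0 : 0 ≤ PySem.Chars.find s ['"'] :=
    (PySem.Chars.find_nonneg_iff s ['"']).mpr h.isInfix
  have hspec := (PySem.Chars.find_spec (s := s) (sub := ['"']) h0).2
  by_contra hne
  exact hspec 0 (by omega) (by simpa using h)

theorem find_cons_quote (c : Char) (t : List Char) (hc : c ≠ '"') :
    PySem.Chars.find (c :: t) ['"'] =
      if PySem.Chars.find t ['"'] = -1 then -1 else PySem.Chars.find t ['"'] + 1 := by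
  have hnp : ¬ ['"'] <+: (c :: t) := by
    intro hp
    exact hc ((List.cons_prefix_cons.mp hp).1).symm
  split_ifs with h1
  · rw [PySem.Chars.find_eq_neg_one_iff] at h1 ⊢
    intro hin
    rw [List.singleton_infix_iff, List.mem_cons] at hin
    rcases hin with h | h
    · exact hc h.symm
    · exact h1 ((List.singleton_infix_iff _ _).mpr h)
  · have hr0 : 0 ≤ PySem.Chars.find t ['"'] := by
      have := PySem.Chars.neg_one_le_find t ['"']; omega
    have hspec := PySem.Chars.find_spec (s := t) (sub := ['"']) hr0
    have hmem : '"' ∈ t := (List.singleton_infix_iff _ _).mp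
      ((PySem.Chars.find_nonneg_iff t ['"']).mp hr0)
    have h0 : 0 ≤ PySem.Chars.find (c :: t) ['"'] :=
      (PySem.Chars.find_nonneg_iff _ ['"']).mpr
        ((List.singleton_infix_iff _ _).mpr (List.mem_cons_of_mem c hmem))
    have hspecr := PySem.Chars.find_spec (s := c :: t) (sub := ['"']) h0
    have hle : PySem.Chars.find (c :: t) ['"'] ≤ PySem.Chars.find t ['"'] + 1 := by
      by_contra hgt
      have := hspecr.2 ((PySem.Chars.find t ['"']).toNat + 1) (by omega)
      rw [List.drop_succ_cons] at this
      exact this hspec.1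
    have hge1 : 1 ≤ PySem.Chars.find (c :: t) ['"'] := by
      by_contra hlt
      have hz : (PySem.Chars.find (c :: t) ['"']).toNat = 0 := by omega
      have := hspecr.1
      rw [hz] at this
      exact hnp (by simpa using this)
    have hge : PySem.Chars.find t ['"'] + 1 ≤ PySem.Chars.find (c :: t) ['"'] := by
      by_contra hlt
      obtain ⟨y, hy⟩ : ∃ y, (PySem.Chars.find (c :: t) ['"']).toNat = y + 1 :=
        ⟨(PySem.Chars.find (c :: t) ['"']).toNat - 1, by omega⟩
      have h2 := hspec.2 y (by omega)
      rw [← List.drop_succ_cons (a := c), ← hy] at h2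
      exact h2 hspecr.1
    omega

theorem findFrom_ge_len (cs : List Char) (pos : Int) (hge : (cs.length : Int) ≤ pos) :
    PySem.Chars.findFrom cs ['"'] pos none = -1 := by
  by_contra h
  have := findFrom_quote_bounds cs pos h
  omega

theorem findFrom_at_quote (cs : List Char) (k : Nat)
    (hlt : k < cs.length) (hc : cs[k] = '"') :
    PySem.Chars.findFrom cs ['"'] (k : Int) none = (k : Int) := by
  rw [PySem.Chars.findFrom_natCast cs ['"'] k (by omega)]
  have hdrop : List.drop k cs = '"' :: List.drop (k + 1) cs := by
    rw [List.drop_eq_getElem_cons hlt, hc]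
  rw [hdrop, find_of_prefix _ (List.cons_prefix_cons.mpr ⟨rfl, List.nil_prefix⟩)]
  norm_num

theorem findFrom_step (cs : List Char) (k : Nat) (c : Char)
    (hlt : k < cs.length) (hc : cs[k] = c) (hne : c ≠ '"') :
    PySem.Chars.findFrom cs ['"'] (k : Int) none = PySem.Chars.findFrom cs ['"'] ((k : Int) + 1) none := by
  rw [show (k : Int) + 1 = ((k + 1 : Nat) : Int) by push_cast; ring]
  rw [PySem.Chars.findFrom_natCast cs ['"'] k (by omega),
      PySem.Chars.findFrom_natCast cs ['"'] (k + 1) (by omega)]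
  have hdrop : List.drop k cs = c :: List.drop (k + 1) cs := by
    rw [List.drop_eq_getElem_cons hlt, hc]
  rw [hdrop, find_cons_quote c _ hne]
  by_cases h1 : PySem.Chars.find (List.drop (k + 1) cs) ['"'] = -1
  · simp [h1]
  · have hp : -1 ≤ PySem.Chars.find (List.drop (k + 1) cs) ['"'] :=
      PySem.Chars.neg_one_le_find _ _
    rw [if_neg h1, if_neg (by omega), if_neg h1]
    push_cast
    ring

-- ==== bsCount layer ====

theorem bsCount_stop_of (cs : List Char) (f : Nat) (idx lo bs : Int)
    (h : idx - bs - 1 < lo) : bsCount cs f idx lo bs = bs := by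
  cases f with
  | zero => rfl
  | succ f => rw [bsCount, if_neg (by omega)]

theorem bsCount_fuel (cs : List Char) (lo : Int) :
    ∀ f f' : Nat, ∀ idx bs : Int, (idx - bs - lo).toNat ≤ f → (idx - bs - lo).toNat ≤ f' →
      bsCount cs f idx lo bs = bsCount cs f' idx lo bs := by
  intro f
  induction f with
  | zero =>
    intro f' idx bs h h'
    rw [bsCount_stop_of cs 0 idx lo bs (by omega), bsCount_stop_of cs f' idx lo bs (by omega)]
  | succ n ih =>
    intro f' idx bs h h'
    by_cases hc : lo ≤ idx - bs - 1
    · obtain ⟨m, rfl⟩ : ∃ m, f' = m + 1 := ⟨f' - 1, by omega⟩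
      rw [bsCount, bsCount, if_pos hc, if_pos hc]
      cases PySem.List.pyGet? cs (idx - bs - 1) with
      | none => rfl
      | some c =>
        by_cases hcb : c = '\\'
        · simp only [hcb, reduceIte]
          exact ih m idx (bs + 1) (by omega) (by omega)
        · simp [hcb]
    · rw [bsCount_stop_of cs _ idx lo bs (by omega), bsCount_stop_of cs f' idx lo bs (by omega)]

theorem bsCount_stop (cs : List Char) (f : Nat) (pos : Int) : bsCount cs f pos pos 0 = 0 :=
  bsCount_stop_of cs f pos pos 0 (by omega)

theorem bsCount_one (cs : List Char) (f : Nat) (pos : Int)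
    (hc : PySem.List.pyGet? cs pos = some '\\') : bsCount cs (f + 1) (pos + 1) pos 0 = 1 := by
  rw [bsCount, if_pos (by omega), show pos + 1 - 0 - 1 = pos by ring, hc]
  norm_num
  exact bsCount_stop_of cs f (pos + 1) pos 1 (by omega)

theorem bsCount_shift1_aux (cs : List Char) (lo : Int)
    (hlo : PySem.List.pyGet? cs lo ≠ some '\\') :
    ∀ f : Nat, ∀ idx bs : Int,
      bsCount cs f idx lo bs = bsCount cs f idx (lo + 1) bs := by
  intro f
  induction f with
  | zero => intro idx bs; rfl
  | succ n ih =>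
    intro idx bs
    by_cases h1 : lo ≤ idx - bs - 1
    · by_cases h2 : lo + 1 ≤ idx - bs - 1
      · rw [bsCount, bsCount, if_pos h1, if_pos h2]
        cases PySem.List.pyGet? cs (idx - bs - 1) with
        | none => rfl
        | some c =>
          by_cases hcb : c = '\\'
          · simp only [hcb, reduceIte]
            exact ih idx (bs + 1)
          · simp [hcb]
      · have he : idx - bs - 1 = lo := by omega
        rw [bsCount, if_pos h1, he, bsCount_stop_of cs _ idx (lo + 1) bs (by omega)]
        cases hg : PySem.List.pyGet? cs lo with
        | none => rfl
        | some c =>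
          have hcb : c ≠ '\\' := fun h => hlo (h ▸ hg)
          simp [hcb]
    · rw [bsCount_stop_of cs _ idx lo bs (by omega),
          bsCount_stop_of cs _ idx (lo + 1) bs (by omega)]

theorem bsCount_shift2_aux (cs : List Char) (lo : Int)
    (hlo : PySem.List.pyGet? cs lo = some '\\') :
    ∀ f : Nat, ∀ idx bs : Int, (idx - bs - lo).toNat ≤ f → lo + 2 ≤ idx - bs →
      bsCount cs f idx lo bs % 2 = bsCount cs f idx (lo + 2) bs % 2 := by
  intro f
  induction f with
  | zero => intro idx bs hk hge; omega
  | succ n ih =>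
    intro idx bs hk hge
    by_cases h2 : lo + 2 ≤ idx - bs - 1
    · rw [bsCount, bsCount, if_pos (by omega), if_pos h2]
      cases PySem.List.pyGet? cs (idx - bs - 1) with
      | none => rfl
      | some c =>
        by_cases hcb : c = '\\'
        · simp only [hcb, reduceIte]
          exact ih idx (bs + 1) (by omega) (by omega)
        · simp [hcb]
    · have he : idx - bs - 1 = lo + 1 := by omega
      rw [bsCount, if_pos (by omega), he, bsCount_stop_of cs _ idx (lo + 2) bs (by omega)]
      cases hg : PySem.List.pyGet? cs (lo + 1) with
      | none => rfl
      | some c =>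
        by_cases hcb : c = '\\'
        · simp only [hcb, reduceIte]
          obtain ⟨m, rfl⟩ : ∃ m, n = m + 1 := ⟨n - 1, by omega⟩
          rw [bsCount, if_pos (by omega), show idx - (bs + 1) - 1 = lo by omega, hlo]
          norm_num
          rw [bsCount_stop_of cs m idx lo (bs + 1 + 1) (by omega)]
          omega
        · simp [hcb]

-- ==== consume layer ====

theorem consumeA_stop (cs : List Char) (f : Nat) (i : Int) (esc : Bool)
    (h : (cs.length : Int) ≤ i) : consumeA cs f i esc = 0 := by
  cases f with
  | zero => rfl
  | succ f => rw [consumeA, if_neg (by omega)]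

theorem consumeA_step (cs : List Char) (f : Nat) (k : Nat) (esc : Bool) (h : k < cs.length) :
    consumeA cs (f + 1) (k : Int) esc =
      if esc then consumeA cs f ((k : Int) + 1) false
      else if cs[k] = '\\' then consumeA cs f ((k : Int) + 1) true
      else if cs[k] = '"' then (k : Int) + 1
      else consumeA cs f ((k : Int) + 1) esc := by
  rw [consumeA, if_pos (by exact_mod_cast h)]
  simp [PySem.List.pyGet?_natCast, List.getElem?_eq_getElem h]

theorem consumeB_eq (cs : List Char) (f : Nat) (pos : Int) :
    consumeB cs (f + 1) pos =
      if PySem.Chars.findFrom cs ['"'] pos none = -1 then 0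
      else if PySem.Int.mod (bsCount cs ((PySem.Chars.findFrom cs ['"'] pos none) - pos).toNat
          (PySem.Chars.findFrom cs ['"'] pos none) pos 0) 2 = 0
        then PySem.Chars.findFrom cs ['"'] pos none + 1
        else consumeB cs f (PySem.Chars.findFrom cs ['"'] pos none + 1) := by
  rw [consumeB]

theorem mod2_eq (x : Int) : PySem.Int.mod x 2 = x % 2 :=
  PySem.Int.mod_eq_emod_of_pos (by norm_num)

theorem consumeB_fuel (cs : List Char) :
    ∀ f f' : Nat, ∀ pos : Int, ((cs.length : Int) + 1 - pos).toNat ≤ f →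
      ((cs.length : Int) + 1 - pos).toNat ≤ f' → consumeB cs f pos = consumeB cs f' pos := by
  intro f
  induction f with
  | zero =>
    intro f' pos h h'
    have hneg := findFrom_ge_len cs pos (by omega)
    cases f' with
    | zero => rfl
    | succ m => rw [consumeB_eq, if_pos hneg]; rfl
  | succ n ih =>
    intro f' pos h h'
    by_cases hge : (cs.length : Int) ≤ pos
    · have hneg := findFrom_ge_len cs pos hge
      cases f' with
      | zero => rw [consumeB_eq, if_pos hneg]; rfl
      | succ m => rw [consumeB_eq, consumeB_eq, if_pos hneg, if_pos hneg]
    · obtain ⟨m, rfl⟩ : ∃ m, f' = m + 1 := ⟨f' - 1, by omega⟩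
      rw [consumeB_eq, consumeB_eq]
      by_cases hneg : PySem.Chars.findFrom cs ['"'] pos none = -1
      · rw [if_pos hneg, if_pos hneg]
      · rw [if_neg hneg, if_neg hneg]
        have hbnd := findFrom_quote_bounds cs pos hneg
        split_ifs with hp
        · rfl
        · exact ih m (PySem.Chars.findFrom cs ['"'] pos none + 1) (by omega) (by omega)

theorem main_aux (cs : List Char) :
    ∀ k : Nat, ∀ pos : Int, ∀ f : Nat, 0 ≤ pos → ((cs.length : Int) + 1 - pos).toNat ≤ k →
      (cs.length : Int) - pos ≤ (f : Int) →
      consumeA cs f pos false = consumeB cs (cs.length + 1) pos := by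
  intro k
  induction k with
  | zero =>
    intro pos f hpos hk hf
    rw [consumeA_stop cs f pos false (by omega)]
    obtain ⟨m, hm⟩ : ∃ m, cs.length + 1 = m + 1 := ⟨cs.length, rfl⟩
    rw [hm, consumeB_eq, if_pos (findFrom_ge_len cs pos (by omega))]
  | succ n ih =>
    intro pos f hpos hk hf
    obtain ⟨k0, rfl⟩ : ∃ k0 : Nat, pos = (k0 : Int) := ⟨pos.toNat, by omega⟩
    by_cases hlen : cs.length ≤ k0
    · rw [consumeA_stop cs f _ false (by exact_mod_cast hlen)]
      obtain ⟨m, hm⟩ : ∃ m, cs.length + 1 = m + 1 := ⟨cs.length, rfl⟩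
      rw [hm, consumeB_eq, if_pos (findFrom_ge_len cs _ (by exact_mod_cast hlen))]
    · push Not at hlen
      have hget : PySem.List.pyGet? cs (k0 : Int) = some cs[k0] := by
        simp [PySem.List.pyGet?_natCast, List.getElem?_eq_getElem hlen]
      obtain ⟨f0, rfl⟩ : ∃ f0, f = f0 + 1 := ⟨f - 1, by omega⟩
      rw [consumeA_step cs f0 k0 false hlen]
      simp only [Bool.false_eq_true, if_false]
      by_cases hbs : cs[k0] = '\\'
      · rw [if_pos hbs]
        by_cases hlen1 : k0 + 1 < cs.length
        · have hA2 : consumeA cs f0 ((k0 : Int) + 1) true = consumeA cs (f0 - 1) ((k0 : Int) + 2) false := by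
            obtain ⟨f1, rfl⟩ : ∃ f1, f0 = f1 + 1 := ⟨f0 - 1, by omega⟩
            rw [show ((k0 : Int) + 1) = ((k0 + 1 : Nat) : Int) by push_cast; ring,
                consumeA_step cs f1 (k0 + 1) true hlen1, if_pos rfl,
                show ((k0 + 1 : Nat) : Int) + 1 = (k0 : Int) + 2 by push_cast; ring]
            norm_num
          rw [hA2]
          by_cases hq : cs[k0 + 1] = '"'
          · have hidx : PySem.Chars.findFrom cs ['"'] (k0 : Int) none = (k0 : Int) + 1 := by
              rw [findFrom_step cs k0 cs[k0] hlen rfl (by rw [hbs]; decide),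
                  show ((k0 : Int) + 1) = ((k0 + 1 : Nat) : Int) by push_cast; ring,
                  findFrom_at_quote cs (k0 + 1) hlen1 hq]
            obtain ⟨m, hm⟩ : ∃ m, cs.length + 1 = m + 1 := ⟨cs.length, rfl⟩
            rw [hm, consumeB_eq, hidx, if_neg (by omega)]
            have hbs1 : bsCount cs (((k0 : Int) + 1 - (k0 : Int)).toNat) ((k0 : Int) + 1) (k0 : Int) 0 = 1 := by
              rw [show ((k0 : Int) + 1 - (k0 : Int)).toNat = 0 + 1 by omega]
              exact bsCount_one cs 0 (k0 : Int) (by rw [hget, hbs])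
            rw [hbs1, if_neg (by rw [mod2_eq]; norm_num),
                show (k0 : Int) + 1 + 1 = (k0 : Int) + 2 by ring,
                ih ((k0 : Int) + 2) (f0 - 1) (by omega) (by omega) (by omega)]
            exact consumeB_fuel cs (cs.length + 1) m ((k0 : Int) + 2) (by omega) (by omega)
          · have hidx : PySem.Chars.findFrom cs ['"'] (k0 : Int) none
                = PySem.Chars.findFrom cs ['"'] ((k0 : Int) + 2) none := by
              rw [findFrom_step cs k0 cs[k0] hlen rfl (by rw [hbs]; decide),
                  show ((k0 : Int) + 1) = ((k0 + 1 : Nat) : Int) by push_cast; ring,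
                  findFrom_step cs (k0 + 1) cs[k0 + 1] hlen1 rfl hq]
              push_cast; ring_nf
            have hBB : consumeB cs (cs.length + 1) ((k0 : Int) + 2) = consumeB cs (cs.length + 1) (k0 : Int) := by
              obtain ⟨m, hm⟩ : ∃ m, cs.length + 1 = m + 1 := ⟨cs.length, rfl⟩
              rw [hm, consumeB_eq, consumeB_eq, hidx]
              by_cases hneg : PySem.Chars.findFrom cs ['"'] ((k0 : Int) + 2) none = -1
              · rw [if_pos hneg, if_pos hneg]
              · have hbnd := findFrom_quote_bounds cs ((k0 : Int) + 2) hneg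
                set idx := PySem.Chars.findFrom cs ['"'] ((k0 : Int) + 2) none with hidxdef
                have hpar : bsCount cs ((idx - (k0 : Int)).toNat) idx (k0 : Int) 0 % 2
                    = bsCount cs ((idx - ((k0 : Int) + 2)).toNat) idx ((k0 : Int) + 2) 0 % 2 := by
                  rw [bsCount_fuel cs ((k0 : Int) + 2) ((idx - ((k0 : Int) + 2)).toNat)
                        ((idx - (k0 : Int)).toNat) idx 0 (by omega) (by omega)]
                  exact bsCount_shift2_aux cs (k0 : Int) (by rw [hget, hbs])
                    ((idx - (k0 : Int)).toNat) idx 0 (by omega) (by omega)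
                rw [if_neg hneg, if_neg hneg, mod2_eq, mod2_eq, hpar]
            rw [← hBB]
            rw [ih ((k0 : Int) + 2) (f0 - 1) (by omega) (by omega) (by omega)]
        · push Not at hlen1
          rw [consumeA_stop cs f0 _ true (by omega)]
          have hnone : PySem.Chars.findFrom cs ['"'] (k0 : Int) none = -1 := by
            rw [PySem.Chars.findFrom_natCast cs ['"'] k0 (by omega)]
            have hdrop : List.drop k0 cs = ['\\'] := by
              rw [List.drop_eq_getElem_cons hlen, hbs, List.drop_eq_nil_of_le (by omega)]
            rw [hdrop, show PySem.Chars.find ['\\'] ['"'] = -1 from by decide]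
            norm_num
          obtain ⟨m, hm⟩ : ∃ m, cs.length + 1 = m + 1 := ⟨cs.length, rfl⟩
          rw [hm, consumeB_eq, if_pos hnone]
      · rw [if_neg hbs]
        by_cases hq : cs[k0] = '"'
        · rw [if_pos hq]
          obtain ⟨m, hm⟩ : ∃ m, cs.length + 1 = m + 1 := ⟨cs.length, rfl⟩
          rw [hm, consumeB_eq, findFrom_at_quote cs k0 hlen hq, if_neg (by omega),
              show ((k0 : Int) - (k0 : Int)).toNat = 0 by omega, bsCount_stop,
              if_pos (by rw [mod2_eq]; norm_num)]
        · rw [if_neg hq]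
          have hidx : PySem.Chars.findFrom cs ['"'] (k0 : Int) none
              = PySem.Chars.findFrom cs ['"'] ((k0 : Int) + 1) none :=
            findFrom_step cs k0 cs[k0] hlen rfl hq
          have hBB : consumeB cs (cs.length + 1) ((k0 : Int) + 1) = consumeB cs (cs.length + 1) (k0 : Int) := by
            obtain ⟨m, hm⟩ : ∃ m, cs.length + 1 = m + 1 := ⟨cs.length, rfl⟩
            rw [hm, consumeB_eq, consumeB_eq, hidx]
            by_cases hneg : PySem.Chars.findFrom cs ['"'] ((k0 : Int) + 1) none = -1
            · rw [if_pos hneg, if_pos hneg]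
            · have hbnd := findFrom_quote_bounds cs ((k0 : Int) + 1) hneg
              set idx := PySem.Chars.findFrom cs ['"'] ((k0 : Int) + 1) none with hidxdef
              have hpar : bsCount cs ((idx - (k0 : Int)).toNat) idx (k0 : Int) 0
                  = bsCount cs ((idx - ((k0 : Int) + 1)).toNat) idx ((k0 : Int) + 1) 0 := by
                rw [bsCount_shift1_aux cs (k0 : Int)
                      (by rw [hget]; exact fun h => hbs (Option.some.inj h)) ((idx - (k0 : Int)).toNat) idx 0]
                exact bsCount_fuel cs ((k0 : Int) + 1) ((idx - (k0 : Int)).toNat)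
                  ((idx - ((k0 : Int) + 1)).toNat) idx 0 (by omega) (by omega)
              rw [if_neg hneg, if_neg hneg, hpar]
          rw [← hBB]
          exact ih ((k0 : Int) + 1) f0 (by omega) (by omega) (by omega)

-- ===== VERDICT (by name: the statement is the Claim_ definition above) =====
theorem consume_json_string_py_spec : Claim_equal_consume_json_string_py := by
  intro source start _ hpre
  unfold Spec_consume_json_string_py consume_json_string_py consume_json_string_py_alt
  exact main_aux source.toList ((source.toList.length : Int) + 1 - (start + 1)).toNat (start + 1)
    ((source.toList.length : Int) - (start + 1)).toNat hpre.1 le_rfl (by omega)
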